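-- pv_equiv track=rewrite | github.com/ShreyX124/CNS-codes | Ciphers/Monoalphabetic_Cipher.py | monoalphabetic_cipher
-- ===== SOURCE A (Python) =====
-- def monoalphabetic_cipher(text):
--     substitution = "ETAOINSHRDICUMWFGYPBVKJXQZ"
--     result = ""
--
--     for char in text:
--         if char.isalpha():
--             base = 'a' if char.islower() else 'A'
--             index = ord(char.upper()) - ord('A')  # Get index in alphabet
--             sub_char = substitution[index]
--             result += sub_char.lower() if char.islower() else sub_char
--         else:
--             result += char  # Keep non-alphabetic characters as-is
--     return result
-- ===== SOURCE B (Python) =====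
-- def monoalphabetic_cipher(text):
--     substitution = "ETAOINSHRDICUMWFGYPBVKJXQZ"
--     uppercase = "ABCDEFGHIJKLMNOPQRSTUVWXYZ"
--     table = str.maketrans(uppercase + uppercase.lower(),
--                           substitution + substitution.lower())
--     return text.translate(table)
-- ===== Notes on version B (the rewrite author's own statement) =====
-- stated objective: idiomatic
-- what changed: Replaces the per-character loop with isalpha/islower branches and index arithmetic by a precomputed 52-entry translation table (str.maketrans over both cases) applied in a single text.translate call; non-alphabetic characters pass through because they are absent from the table.
import Mathlib
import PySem

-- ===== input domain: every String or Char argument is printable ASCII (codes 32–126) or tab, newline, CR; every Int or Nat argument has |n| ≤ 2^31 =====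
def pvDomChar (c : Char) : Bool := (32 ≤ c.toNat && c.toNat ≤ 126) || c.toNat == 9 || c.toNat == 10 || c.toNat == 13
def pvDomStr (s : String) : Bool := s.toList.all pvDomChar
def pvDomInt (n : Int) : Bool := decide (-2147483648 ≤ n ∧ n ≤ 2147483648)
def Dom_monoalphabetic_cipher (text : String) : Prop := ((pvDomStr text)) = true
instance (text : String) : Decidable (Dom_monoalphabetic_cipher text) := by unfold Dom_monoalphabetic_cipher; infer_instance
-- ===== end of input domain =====

-- B replaces A's per-character isalpha/islower branching and index arithmetic by a
-- precomputed 52-entry translation table applied in one pass (str.maketrans/translate): idiomatic.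
set_option maxRecDepth 4000


-- ===== PORT A =====
def monoalphabetic_cipher (text : String) : String :=
  let substitution := "ETAOINSHRDICUMWFGYPBVKJXQZ"
  String.mk (text.toList.foldl (fun result char =>
    if PySem.Chars.isalpha char then
      let _base := if PySem.Chars.islower char then 'a' else 'A'
      let index : Int := ((PySem.Chars.upperChar char).toNat : Int) - ('A'.toNat : Int)
      -- index is 0..25 whenever isalpha holds (ASCII), so pyGet? never misses; getD is unreachable
      let sub_char := (PySem.List.pyGet? substitution.toList index).getD char
      result ++ [if PySem.Chars.islower char then PySem.Chars.lowerChar sub_char else sub_char]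
    else result ++ [char]) [])

-- ===== PORT B =====
def monoalphabetic_cipher_alt (text : String) : String :=
  let substitution := "ETAOINSHRDICUMWFGYPBVKJXQZ"
  let uppercase := "ABCDEFGHIJKLMNOPQRSTUVWXYZ"
  -- str.maketrans over both cases: a 52-entry char→char table
  let table : PySem.Dict Char Char :=
    PySem.Dict.ofList ((uppercase.toList ++ (PySem.Str.lower uppercase).toList).zip
                       (substitution.toList ++ (PySem.Str.lower substitution).toList))
  -- text.translate(table): chars absent from the table pass through
  String.mk (text.toList.map (fun c => (table.get? c).getD c))

-- ===== PRECONDITION & SPEC =====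
def Spec_monoalphabetic_cipher (text : String) (out : String) : Prop := out = monoalphabetic_cipher_alt text
instance (text : String) (out : String) : Decidable (Spec_monoalphabetic_cipher text out) := by unfold Spec_monoalphabetic_cipher; infer_instance

-- ===== CLAIM (what is proved, stated in full; the proofs are below) =====
def Claim_equal_monoalphabetic_cipher : Prop := ∀ (text : String), Dom_monoalphabetic_cipher text → Spec_monoalphabetic_cipher text (monoalphabetic_cipher text)

-- ===== LEMMAS AND PROOFS =====

-- A's per-character transformation, factored out for the proof
def pvAChar (char : Char) : Char :=
  if PySem.Chars.isalpha char then
    let index : Int := ((PySem.Chars.upperChar char).toNat : Int) - ('A'.toNat : Int)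
    let sub_char := (PySem.List.pyGet? "ETAOINSHRDICUMWFGYPBVKJXQZ".toList index).getD char
    if PySem.Chars.islower char then PySem.Chars.lowerChar sub_char else sub_char
  else char

-- B's per-character transformation
def pvBChar (c : Char) : Char :=
  let table : PySem.Dict Char Char :=
    PySem.Dict.ofList (("ABCDEFGHIJKLMNOPQRSTUVWXYZ".toList ++ (PySem.Str.lower "ABCDEFGHIJKLMNOPQRSTUVWXYZ").toList).zip
                       ("ETAOINSHRDICUMWFGYPBVKJXQZ".toList ++ (PySem.Str.lower "ETAOINSHRDICUMWFGYPBVKJXQZ").toList))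
  (table.get? c).getD c

theorem pvA_foldl (l : List Char) (acc : List Char) :
    l.foldl (fun result char =>
      if PySem.Chars.isalpha char then
        let _base := if PySem.Chars.islower char then 'a' else 'A'
        let index : Int := ((PySem.Chars.upperChar char).toNat : Int) - ('A'.toNat : Int)
        let sub_char := (PySem.List.pyGet? "ETAOINSHRDICUMWFGYPBVKJXQZ".toList index).getD char
        result ++ [if PySem.Chars.islower char then PySem.Chars.lowerChar sub_char else sub_char]
      else result ++ [char]) acc = acc ++ l.map pvAChar := by
  induction l generalizing acc with
  | nil => simp
  | cons c t ih =>
    simp only [List.foldl_cons, List.map_cons, ih]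
    by_cases h : PySem.Chars.isalpha c = true <;> simp [pvAChar, h]

-- per character, over all ASCII codes, the two transformations agree
theorem pvChar_eq_ascii : ∀ n ∈ List.range 128, pvAChar (Char.ofNat n) = pvBChar (Char.ofNat n) := by
  decide

theorem pvChar_eq (c : Char) (h : pvDomChar c = true) : pvAChar c = pvBChar c := by
  have hlt : c.toNat < 128 := by
    simp only [pvDomChar, Bool.or_eq_true, Bool.and_eq_true, decide_eq_true_eq,
      beq_iff_eq, Nat.le_iff_lt_or_eq] at h
    omega
  have := pvChar_eq_ascii c.toNat (List.mem_range.mpr hlt)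
  simpa [Char.ofNat_toNat] using this

-- ===== VERDICT (by name: the statement is the Claim_ definition above) =====
theorem monoalphabetic_cipher_spec : Claim_equal_monoalphabetic_cipher := by
  intro text hdom
  unfold Spec_monoalphabetic_cipher monoalphabetic_cipher monoalphabetic_cipher_alt
  simp only [pvA_foldl, List.nil_append]
  congr 1
  apply List.map_congr_left
  intro c hc
  have hd : pvDomChar c = true := by
    have := hdom
    unfold Dom_monoalphabetic_cipher pvDomStr at this
    exact List.all_eq_true.mp this c hc
  have := pvChar_eq c hd
  simpa [pvAChar, pvBChar] using this
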